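-- pv_equiv track=rewrite | github.com/woodwj/Nightfall | NightOne/utils.py | gen_dict_extract
-- ===== SOURCE A (Python) =====
-- def gen_dict_extract(key, var):
--     if hasattr(var,'items'):
--         for k, v in var.items():
--             if k == key:
--                 yield v
--             if isinstance(v, dict):
--                 for result in gen_dict_extract(key, v):
--                     yield result
--             elif isinstance(v, list):
--                 for d in v:
--                     for result in gen_dict_extract(key, d):
--                         yield result
-- ===== SOURCE B (Python) =====
-- def gen_dict_extract(key, var):
--     # Iterative: explicit LIFO stack of tasks instead of recursion.
--     stack = [('expand', var)]
--     while stack: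
--         tag, obj = stack.pop()
--         if tag == 'yield':
--             yield obj
--             continue
--         if not hasattr(obj, 'items'):
--             continue
--         tasks = []
--         for k, v in obj.items():
--             if k == key:
--                 tasks.append(('yield', v))
--             if isinstance(v, dict):
--                 tasks.append(('expand', v))
--             elif isinstance(v, list):
--                 tasks.extend(('expand', d) for d in v)
--         stack.extend(reversed(tasks))
-- ===== Notes on version B (the rewrite author's own statement) =====
-- stated objective: alternative
-- what changed: Replaced the recursive generator by an iterative loop over an explicit LIFO stack of yield/expand tasks, pushing each expansion's task list reversed to keep pre-order yield order.
-- outside the precondition, e.g. on gen_dict_extract('a', {'a': [{'a': 1}]}): A returns [[{'a': 1}], 1], B returns [[{'a': 1}], 1]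
import Mathlib
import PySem

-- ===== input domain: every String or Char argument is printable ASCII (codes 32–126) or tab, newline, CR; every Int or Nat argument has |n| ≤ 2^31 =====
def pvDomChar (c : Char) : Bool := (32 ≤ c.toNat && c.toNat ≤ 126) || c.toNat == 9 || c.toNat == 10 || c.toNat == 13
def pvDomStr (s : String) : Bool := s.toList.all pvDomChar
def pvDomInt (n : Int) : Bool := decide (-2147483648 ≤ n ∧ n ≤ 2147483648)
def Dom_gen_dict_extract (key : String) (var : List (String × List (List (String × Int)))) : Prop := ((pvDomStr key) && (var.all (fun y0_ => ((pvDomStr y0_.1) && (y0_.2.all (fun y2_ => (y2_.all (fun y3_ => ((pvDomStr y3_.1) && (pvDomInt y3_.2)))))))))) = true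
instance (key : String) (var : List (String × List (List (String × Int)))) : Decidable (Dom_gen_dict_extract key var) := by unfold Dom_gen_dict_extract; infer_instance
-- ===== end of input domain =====

-- B replaces A's recursive generator by an explicit LIFO task stack (iterative, same pre-order
-- yield order); objective: alternative decomposition, not claimed faster.

-- ===== PORT A =====
-- recursive call gen_dict_extract(key, d) on an INNER dict (values are ints, so the
-- isinstance(v, dict)/isinstance(v, list) branches never fire at this level)
def pvInnerA (key : String) (d : List (String × Int)) : List Int :=
  d.foldl (fun acc kv => if kv.1 == key then acc ++ [kv.2] else acc) []

-- outer level: values are always lists at this type, so 'isinstance(v, dict)' is False and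
-- 'isinstance(v, list)' is True; 'if k == key: yield v' would yield the LIST v (not an int) —
-- such inputs are excluded by Pre_gen_dict_extract, and the branch contributes nothing here.
def gen_dict_extract (key : String) (var : List (String × List (List (String × Int)))) : List Int :=
  var.foldl (fun acc kv => kv.2.foldl (fun acc2 d => acc2 ++ pvInnerA key d) acc) []

-- ===== PORT B =====
-- the stack entries of Source B: ('yield', v) with v an int or (excluded by Pre_) a list,
-- ('expand', obj) with obj the outer dict or an inner dict
inductive PvTask where
  | yieldI : Int → PvTask
  | yieldL : List (List (String × Int)) → PvTask
  | expandOuter : List (String × List (List (String × Int))) → PvTask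
  | expandInner : List (String × Int) → PvTask

-- the ordered task list built when expanding the outer dict (v is always a list here)
def pvTasksOuter (key : String) (var : List (String × List (List (String × Int)))) : List PvTask :=
  var.flatMap (fun kv =>
    (if kv.1 == key then [PvTask.yieldL kv.2] else []) ++ kv.2.map PvTask.expandInner)

-- the ordered task list built when expanding an inner dict (v is an int: no expansion)
def pvTasksInner (key : String) (d : List (String × Int)) : List PvTask :=
  d.flatMap (fun kv => if kv.1 == key then [PvTask.yieldI kv.2] else [])

-- termination measure for the stack loop
def pvSize : PvTask → Nat
  | .yieldI _ => 1
  | .yieldL _ => 1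
  | .expandInner d => 1 + d.length
  | .expandOuter var => 1 + (var.map (fun kv => 1 + (kv.2.map (fun d => 1 + d.length)).sum)).sum

theorem pvSize_tasksInner (key : String) (d : List (String × Int)) :
    ((pvTasksInner key d).map pvSize).sum ≤ d.length := by
  induction d with
  | nil => simp [pvTasksInner]
  | cons kv t ih =>
    simp only [pvTasksInner, List.flatMap_cons, List.map_append, List.sum_append] at *
    split <;> simp only [List.map_cons, List.map_nil, List.sum_cons, List.sum_nil,
      List.length_cons, pvSize] <;> omega

theorem pvSize_tasksOuter (key : String) (var : List (String × List (List (String × Int)))) :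
    ((pvTasksOuter key var).map pvSize).sum
      ≤ (var.map (fun kv => 1 + (kv.2.map (fun d => 1 + d.length)).sum)).sum := by
  induction var with
  | nil => simp [pvTasksOuter]
  | cons kv t ih =>
    simp only [pvTasksOuter, List.flatMap_cons, List.map_append, List.sum_append,
      List.map_cons, List.sum_cons] at *
    have h : ((kv.2.map PvTask.expandInner).map pvSize).sum
        = (kv.2.map (fun d => 1 + d.length)).sum := by
      simp only [List.map_map, Function.comp_def, pvSize]
    split <;> simp only [List.map_cons, List.map_nil, List.sum_cons, List.sum_nil, pvSize] <;> omega

-- the while-loop of Source B: the head of the list is the top of the stack; pushing the reversed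
-- task list and popping from the end is processing the task list in order before the rest
def pvLoop (key : String) : List PvTask → List Int
  | [] => []
  | .yieldI n :: rest => n :: pvLoop key rest
  -- Python yields the non-int list value here; excluded by Pre_gen_dict_extract
  | .yieldL _ :: rest => pvLoop key rest
  | .expandOuter v :: rest => pvLoop key (pvTasksOuter key v ++ rest)
  | .expandInner d :: rest => pvLoop key (pvTasksInner key d ++ rest)
termination_by ts => (ts.map pvSize).sum
decreasing_by
  · simp [pvSize]
  · simp [pvSize]
  · have := pvSize_tasksOuter key v
    simp only [List.map_cons, List.sum_cons, List.map_append, List.sum_append, pvSize]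
    omega
  · have := pvSize_tasksInner key d
    simp only [List.map_cons, List.sum_cons, List.map_append, List.sum_append, pvSize]
    omega

def gen_dict_extract_alt (key : String) (var : List (String × List (List (String × Int)))) : List Int :=
  pvLoop key [PvTask.expandOuter var]

-- ===== PRECONDITION & SPEC =====
-- Pre_ excludes inputs where key is an outer-dict key: there A yields that key's LIST value,
-- which is not a value of the declared List Int result type.
def Pre_gen_dict_extract (key : String) (var : List (String × List (List (String × Int)))) : Prop :=
  ∀ kv ∈ var, kv.1 ≠ key
instance (key : String) (var : List (String × List (List (String × Int)))) : Decidable (Pre_gen_dict_extract key var) := by unfold Pre_gen_dict_extract; infer_instance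

def pvWitness_gen_dict_extract : String × (List (String × List (List (String × Int)))) :=
  ("k", [("a", [[("k", 3)], [("b", 1), ("k", -2)]]), ("b", [])])

def Spec_gen_dict_extract (key : String) (var : List (String × List (List (String × Int)))) (out : List Int) : Prop := out = gen_dict_extract_alt key var
instance (key : String) (var : List (String × List (List (String × Int)))) (out : List Int) : Decidable (Spec_gen_dict_extract key var out) := by unfold Spec_gen_dict_extract; infer_instance

-- ===== CLAIM (what is proved, stated in full; the proofs are below) =====
def Claim_equal_gen_dict_extract : Prop := ∀ (key : String) (var : List (String × List (List (String × Int)))), Dom_gen_dict_extract key var → Pre_gen_dict_extract key var → Spec_gen_dict_extract key var (gen_dict_extract key var)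

-- ===== LEMMAS AND PROOFS =====

-- what one task contributes to the output
def pvDen (key : String) : PvTask → List Int
  | .yieldI n => [n]
  | .yieldL _ => []
  | .expandInner d => d.flatMap (fun kv => if kv.1 == key then [kv.2] else [])
  | .expandOuter var =>
      var.flatMap (fun kv =>
        kv.2.flatMap (fun d => d.flatMap (fun kv2 => if kv2.1 == key then [kv2.2] else [])))

theorem pvDen_tasksInner (key : String) (d : List (String × Int)) :
    (pvTasksInner key d).flatMap (pvDen key) = pvDen key (.expandInner d) := by
  induction d with
  | nil => simp [pvTasksInner, pvDen]
  | cons kv t ih =>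
    simp only [pvTasksInner, pvDen, List.flatMap_cons, List.flatMap_append] at *
    split <;> simp_all [pvDen]

theorem pvDen_tasksOuter (key : String) (var : List (String × List (List (String × Int)))) :
    (pvTasksOuter key var).flatMap (pvDen key) = pvDen key (.expandOuter var) := by
  induction var with
  | nil => simp [pvTasksOuter, pvDen]
  | cons kv t ih =>
    have h : (kv.2.map PvTask.expandInner).flatMap (pvDen key)
        = kv.2.flatMap (fun d => d.flatMap (fun kv2 => if kv2.1 == key then [kv2.2] else [])) := by
      rw [List.flatMap_map]; rfl
    simp only [pvTasksOuter, pvDen, List.flatMap_cons, List.flatMap_append] at *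
    split <;> simp_all [pvDen]

theorem pvLoop_eq_flatMap (key : String) (ts : List PvTask) :
    pvLoop key ts = ts.flatMap (pvDen key) := by
  induction ts using pvLoop.induct key with
  | case1 => simp [pvLoop]
  | case2 n rest ih => simp [pvLoop, ih, pvDen]
  | case3 l rest ih => simp [pvLoop, ih, pvDen]
  | case4 v rest ih =>
    simp only [pvLoop, ih, List.flatMap_append, List.flatMap_cons, pvDen_tasksOuter]
  | case5 d rest ih =>
    simp only [pvLoop, ih, List.flatMap_append, List.flatMap_cons, pvDen_tasksInner]

theorem pvInnerA_eq (key : String) (d : List (String × Int)) :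
    pvInnerA key d = d.flatMap (fun kv => if kv.1 == key then [kv.2] else []) := by
  unfold pvInnerA
  induction d with
  | nil => simp
  | cons kv t ih =>
    have h : ∀ (acc : List Int) (l : List (String × Int)),
        l.foldl (fun a kv => if kv.1 == key then a ++ [kv.2] else a) acc
          = acc ++ l.flatMap (fun kv => if kv.1 == key then [kv.2] else []) := by
      intro acc l
      induction l generalizing acc with
      | nil => simp
      | cons kv' t' ih' => simp only [List.foldl_cons, List.flatMap_cons, ih']; split <;> simp
    simpa using h [] (kv :: t)

theorem genA_eq_den (key : String) (var : List (String × List (List (String × Int)))) :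
    gen_dict_extract key var = pvDen key (.expandOuter var) := by
  unfold gen_dict_extract
  rw [PySem.List.foldl_congr_mem var _ (fun acc kv => acc ++ kv.2.flatMap (pvInnerA key)) []
      (fun acc kv _ => PySem.List.foldl_append_eq_flatMap _ _ _),
    PySem.List.foldl_append_eq_flatMap]
  simp only [List.nil_append, pvDen]
  exact List.flatMap_congr (fun kv _ => List.flatMap_congr (fun d _ => pvInnerA_eq key d))

-- ===== VERDICT (by name: the statement is the Claim_ definition above) =====
theorem gen_dict_extract_spec : Claim_equal_gen_dict_extract := by
  intro key var _ _
  unfold Spec_gen_dict_extract gen_dict_extract_alt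
  rw [genA_eq_den, pvLoop_eq_flatMap]
  simp
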